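-- pv_equiv track=rewrite | github.com/david-a-parry/indel_repeat_classifier | indel_repeat_classifier/repeats_from_variants.py | left_align_insertion
-- ===== SOURCE A (Python) =====
-- def left_align_insertion(chrom, pos, ref, alt, fasta):
--     ref_len = len(ref)
--     alt_len = len(alt)
--     if alt[:ref_len] != ref:
--         return ref, alt, pos  # ignore complex indels
--     seq = fasta[chrom]
--     start = pos - 1
--     end = start + ref_len
--     var_len = alt_len - ref_len
--     while alt[-1] == seq[start] and start > 0:
--         start -= 1
--         end -= 1
--         alt = seq[start] + alt[:-1]
--         ref = seq[start:end]
--     pos = start + 1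
--     return ref, alt, pos
-- ===== SOURCE B (Python) =====
-- def left_align_insertion(chrom, pos, ref, alt, fasta):
--     # Count the left shifts first, by indexing the original strings instead of
--     # rebuilding alt/ref at each step; then rebuild the final strings once.
--     ref_len = len(ref)
--     if alt[:ref_len] != ref:
--         return ref, alt, pos  # ignore complex indels
--     seq = fasta[chrom]
--     alt_len = len(alt)
--     start = pos - 1
--     k = 0
--     while start - k > 0:
--         # after k shifts the last char of the shifted alt is:
--         j = alt_len - 1 - k
--         c = alt[j] if j >= 0 else seq[start + j]
--         if c != seq[start - k]:
--             break
--         k += 1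
--     if k == 0:
--         return ref, alt, pos
--     new_start = start - k
--     new_alt = (seq[new_start:start] + alt)[:alt_len]
--     return seq[new_start:new_start + ref_len], new_alt, new_start + 1
-- ===== Notes on version B (the rewrite author's own statement) =====
-- stated objective: alternative
-- what changed: Instead of rebuilding the alt and ref strings on every left shift, B first counts the number of shifts with per-step index comparisons into the original strings and then rebuilds the final ref/alt once by slicing.
import Mathlib
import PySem

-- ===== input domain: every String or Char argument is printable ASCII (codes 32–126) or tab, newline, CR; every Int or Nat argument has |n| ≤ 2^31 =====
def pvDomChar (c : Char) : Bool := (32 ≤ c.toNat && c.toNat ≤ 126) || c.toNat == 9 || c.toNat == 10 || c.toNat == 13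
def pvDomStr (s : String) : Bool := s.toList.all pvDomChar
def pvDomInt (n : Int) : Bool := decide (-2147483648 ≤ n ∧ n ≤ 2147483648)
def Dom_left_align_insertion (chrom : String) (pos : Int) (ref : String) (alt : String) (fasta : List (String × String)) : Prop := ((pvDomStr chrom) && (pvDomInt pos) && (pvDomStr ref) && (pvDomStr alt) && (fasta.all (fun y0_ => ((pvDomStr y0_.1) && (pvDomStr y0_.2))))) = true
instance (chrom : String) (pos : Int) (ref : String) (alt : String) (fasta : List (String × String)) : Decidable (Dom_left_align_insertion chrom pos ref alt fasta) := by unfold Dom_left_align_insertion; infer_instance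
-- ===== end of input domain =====

-- B replaces A's per-shift string rebuilding by an index scan that only counts the shifts,
-- rebuilding the final ref/alt strings once at the end (objective: alternative algorithm, same values).

-- ===== PORT A =====
-- the while loop: state (start, end, ref, alt); fuel makes the recursion total (≥ iterations under Pre_)
def laLoopA (seq : List Char) : Nat → Int → Int → List Char → List Char → Int × List Char × List Char
  | 0, start, _, refL, altL => (start, refL, altL)
  | fuel + 1, start, endI, refL, altL =>
    match PySem.List.pyGet? altL (-1), PySem.List.pyGet? seq start with
    | some a, some b =>
      if a = b ∧ 0 < start then
        let start' := start - 1
        let endI' := endI - 1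
        match PySem.List.pyGet? seq start' with
        | some c =>
            laLoopA seq fuel start' endI'
              (PySem.List.slice seq (some start') (some endI'))
              (c :: PySem.List.slice altL none (some (-1)))
        | none => (start, refL, altL)    -- IndexError in Python; outside Pre_
      else (start, refL, altL)
    | _, _ => (start, refL, altL)        -- IndexError in Python; outside Pre_

def left_align_insertion (chrom : String) (pos : Int) (ref : String) (alt : String) (fasta : List (String × String)) : String × String × Int :=
  let ref_len := PySem.Str.len ref
  let alt_len := PySem.Str.len alt
  if PySem.Str.slice alt none (some ref_len) ≠ ref then (ref, alt, pos)  -- ignore complex indels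
  else
    match (PySem.Dict.mk fasta).get? chrom with
    | none => (ref, alt, pos)            -- KeyError in Python; outside Pre_
    | some seqS =>
      let start := pos - 1
      let endI := start + ref_len
      let _var_len := alt_len - ref_len  -- computed and unused, as in A
      let r := laLoopA seqS.toList (start.toNat + 1) start endI ref.toList alt.toList
      (String.ofList r.2.1, String.ofList r.2.2, r.1 + 1)

-- ===== PORT B =====
-- the counting loop: k = number of shifts so far; O(1) per step, no string rebuilding
def laScanB (seq alt0 : List Char) (start L : Int) : Nat → Int → Int
  | 0, k => k
  | fuel + 1, k =>
    if 0 < start - k then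
      let j := L - 1 - k
      let c? := if 0 ≤ j then PySem.List.pyGet? alt0 j else PySem.List.pyGet? seq (start + j)
      match c?, PySem.List.pyGet? seq (start - k) with
      | some c, some d => if c ≠ d then k else laScanB seq alt0 start L fuel (k + 1)
      | _, _ => k                        -- IndexError in Python; outside Pre_
    else k

def left_align_insertion_alt (chrom : String) (pos : Int) (ref : String) (alt : String) (fasta : List (String × String)) : String × String × Int :=
  let ref_len := PySem.Str.len ref
  if PySem.Str.slice alt none (some ref_len) ≠ ref then (ref, alt, pos)  -- ignore complex indels
  else
    match (PySem.Dict.mk fasta).get? chrom with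
    | none => (ref, alt, pos)            -- KeyError in Python; outside Pre_
    | some seqS =>
      let seq := seqS.toList
      let alt_len := PySem.Str.len alt
      let start := pos - 1
      let k := laScanB seq alt.toList start alt_len (start.toNat + 1) 0
      if k = 0 then (ref, alt, pos)
      else
        let ns := start - k
        let newAlt := PySem.List.slice (PySem.List.slice seq (some ns) (some start) ++ alt.toList) none (some alt_len)
        (String.ofList (PySem.List.slice seq (some ns) (some (ns + ref_len))), String.ofList newAlt, ns + 1)

-- ===== PRECONDITION & SPEC =====
-- Pre_ excludes exactly the inputs on which the Python A raises: when alt starts with ref, A looks up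
-- fasta[chrom] (KeyError if absent), reads alt[-1] (IndexError if alt is empty) and seq[pos-1]
-- (IndexError unless -len(seq) ≤ pos-1 < len(seq)). On every input A returns on, Pre_ holds.
def Pre_left_align_insertion (chrom : String) (pos : Int) (ref : String) (alt : String) (fasta : List (String × String)) : Prop :=
  PySem.Str.slice alt none (some (PySem.Str.len ref)) = ref →
    (((PySem.Dict.mk fasta).get? chrom).isSome = true ∧ alt ≠ "" ∧
      -(PySem.Str.len (((PySem.Dict.mk fasta).get? chrom).getD "")) ≤ pos - 1 ∧
      pos - 1 < PySem.Str.len (((PySem.Dict.mk fasta).get? chrom).getD ""))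
instance (chrom : String) (pos : Int) (ref : String) (alt : String) (fasta : List (String × String)) : Decidable (Pre_left_align_insertion chrom pos ref alt fasta) := by unfold Pre_left_align_insertion; infer_instance

def pvWitness_left_align_insertion : String × Int × String × String × (List (String × String)) := ("1", 2, "A", "AC", [("1", "AAC")])

def Spec_left_align_insertion (chrom : String) (pos : Int) (ref : String) (alt : String) (fasta : List (String × String)) (out : String × String × Int) : Prop := out = left_align_insertion_alt chrom pos ref alt fasta
instance (chrom : String) (pos : Int) (ref : String) (alt : String) (fasta : List (String × String)) (out : String × String × Int) : Decidable (Spec_left_align_insertion chrom pos ref alt fasta out) := by unfold Spec_left_align_insertion; infer_instance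

-- ===== CLAIM (what is proved, stated in full; the proofs are below) =====
def Claim_equal_left_align_insertion : Prop := ∀ (chrom : String) (pos : Int) (ref : String) (alt : String) (fasta : List (String × String)), Dom_left_align_insertion chrom pos ref alt fasta → Pre_left_align_insertion chrom pos ref alt fasta → Spec_left_align_insertion chrom pos ref alt fasta (left_align_insertion chrom pos ref alt fasta)

-- ===== LEMMAS AND PROOFS =====

def altAt (seq alt0 : List Char) (s k : Nat) : List Char :=
  ((seq.drop (s - k)).take k ++ alt0).take alt0.length

lemma length_altAt (seq alt0 : List Char) (s k : Nat) :
    (altAt seq alt0 s k).length = alt0.length := by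
  simp [altAt]

lemma altAt_zero (seq alt0 : List Char) (s : Nat) : altAt seq alt0 s 0 = alt0 := by
  simp [altAt]

lemma altAt_succ (seq alt0 : List Char) (s k : Nat) (hk : k + 1 ≤ s) (hL : alt0 ≠ [])
    (h : s - (k + 1) < seq.length) :
    altAt seq alt0 s (k + 1) = seq[s - (k + 1)]'h :: (altAt seq alt0 s k).dropLast := by
  have h0 : 0 < alt0.length := List.length_pos_of_ne_nil hL
  have hL' : (altAt seq alt0 s k).length = alt0.length := by simp [altAt]
  rw [List.dropLast_eq_take, hL']
  unfold altAt
  rw [List.drop_eq_getElem_cons h]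
  have h1 : s - (k+1) + 1 = s - k := by omega
  rw [h1, List.take_succ_cons, List.cons_append, List.take_cons h0]
  congr 1
  rw [List.take_take]
  congr 1
  omega

lemma altAt_last (seq alt0 : List Char) (s k : Nat) (hk : k ≤ s) (hs : s < seq.length)
    (hL : alt0 ≠ []) :
    (altAt seq alt0 s k)[alt0.length - 1]? =
      if k + 1 ≤ alt0.length then alt0[alt0.length - 1 - k]? else seq[s - k + alt0.length - 1]? := by
  have h0 : 0 < alt0.length := List.length_pos_of_ne_nil hL
  have hlen : ((seq.drop (s - k)).take k).length = k := by simp; omega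
  unfold altAt
  rw [List.getElem?_take, if_pos (by omega), List.getElem?_append, hlen]
  by_cases hkL : k + 1 ≤ alt0.length
  · rw [if_neg (by omega), if_pos hkL]
  · rw [if_pos (by omega), if_neg hkL, List.getElem?_take, if_pos (by omega), List.getElem?_drop]
    congr 1; omega

lemma loopA_step_neg (seq : List Char) (fuel : Nat) (start endI : Int) (refL altL : List Char)
    (a b : Char) (ha : PySem.List.pyGet? altL (-1) = some a)
    (hb : PySem.List.pyGet? seq start = some b) (hcond : ¬ (a = b ∧ 0 < start)) :
    laLoopA seq (fuel + 1) start endI refL altL = (start, refL, altL) := by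
  conv_lhs => rw [laLoopA]
  rw [ha, hb]
  exact if_neg hcond

lemma loopA_step_pos (seq : List Char) (fuel : Nat) (start endI : Int) (refL altL : List Char)
    (a b c : Char) (ha : PySem.List.pyGet? altL (-1) = some a)
    (hb : PySem.List.pyGet? seq start = some b) (hcond : a = b ∧ 0 < start)
    (hc : PySem.List.pyGet? seq (start - 1) = some c) :
    laLoopA seq (fuel + 1) start endI refL altL =
      laLoopA seq fuel (start - 1) (endI - 1)
        (PySem.List.slice seq (some (start - 1)) (some (endI - 1)))
        (c :: PySem.List.slice altL none (some (-1))) := by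
  conv_lhs => rw [laLoopA]
  rw [ha, hb]
  show (if a = b ∧ 0 < start then
      match PySem.List.pyGet? seq (start - 1) with
      | some c => laLoopA seq fuel (start - 1) (endI - 1)
          (PySem.List.slice seq (some (start - 1)) (some (endI - 1)))
          (c :: PySem.List.slice altL none (some (-1)))
      | none => (start, refL, altL)
    else (start, refL, altL)) = _
  rw [if_pos hcond, hc]

lemma scanB_step_out (seq alt0 : List Char) (start L : Int) (fuel : Nat) (k : Int)
    (hcond : ¬ 0 < start - k) : laScanB seq alt0 start L (fuel + 1) k = k := by
  conv_lhs => rw [laScanB]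
  rw [if_neg hcond]

lemma scanB_step_stop (seq alt0 : List Char) (start L : Int) (fuel : Nat) (k : Int)
    (c d : Char) (hcond : 0 < start - k)
    (hc : (if 0 ≤ L - 1 - k then PySem.List.pyGet? alt0 (L - 1 - k)
           else PySem.List.pyGet? seq (start + (L - 1 - k))) = some c)
    (hd : PySem.List.pyGet? seq (start - k) = some d) (hne : c ≠ d) :
    laScanB seq alt0 start L (fuel + 1) k = k := by
  conv_lhs => rw [laScanB]
  rw [if_pos hcond]
  show (match (if 0 ≤ L - 1 - k then PySem.List.pyGet? alt0 (L - 1 - k)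
        else PySem.List.pyGet? seq (start + (L - 1 - k))), PySem.List.pyGet? seq (start - k) with
    | some c, some d => if c ≠ d then k else laScanB seq alt0 start L fuel (k + 1)
    | _, _ => k) = _
  rw [hc, hd]
  exact if_pos hne

lemma scanB_step_go (seq alt0 : List Char) (start L : Int) (fuel : Nat) (k : Int)
    (c d : Char) (hcond : 0 < start - k)
    (hc : (if 0 ≤ L - 1 - k then PySem.List.pyGet? alt0 (L - 1 - k)
           else PySem.List.pyGet? seq (start + (L - 1 - k))) = some c)
    (hd : PySem.List.pyGet? seq (start - k) = some d) (heq : c = d) :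
    laScanB seq alt0 start L (fuel + 1) k = laScanB seq alt0 start L fuel (k + 1) := by
  conv_lhs => rw [laScanB]
  rw [if_pos hcond]
  show (match (if 0 ≤ L - 1 - k then PySem.List.pyGet? alt0 (L - 1 - k)
        else PySem.List.pyGet? seq (start + (L - 1 - k))), PySem.List.pyGet? seq (start - k) with
    | some c, some d => if c ≠ d then k else laScanB seq alt0 start L fuel (k + 1)
    | _, _ => k) = _
  rw [hc, hd]
  exact if_neg (by simp [heq])

lemma loop_scan (seq alt0 : List Char) (R : Nat) (s : Nat) (hs : s < seq.length) (hL : alt0 ≠ []) :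
    ∀ fuel k : Nat, 1 ≤ k → k ≤ s → s - k < fuel →
    ∃ K : Nat, k ≤ K ∧ K ≤ s ∧
      laScanB seq alt0 (s : Int) (alt0.length : Int) fuel (k : Int) = (K : Int) ∧
      laLoopA seq fuel ((s : Int) - k) ((s : Int) - k + R) ((seq.drop (s - k)).take R) (altAt seq alt0 s k)
        = ((s : Int) - K, (seq.drop (s - K)).take R, altAt seq alt0 s K) := by
  intro fuel
  induction fuel with
  | zero => intro k h1 h2 h3; omega
  | succ fuel ih =>
    intro k h1 h2 h3
    have h0 : 0 < alt0.length := List.length_pos_of_ne_nil hL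
    -- the two ways of reading the compared char agree
    have key : PySem.List.pyGet? (altAt seq alt0 s k) (-1) =
        (if 0 ≤ (alt0.length : Int) - 1 - k then PySem.List.pyGet? alt0 ((alt0.length : Int) - 1 - k)
         else PySem.List.pyGet? seq ((s : Int) + ((alt0.length : Int) - 1 - k))) := by
      rw [PySem.List.pyGet?_neg_one, List.getLast?_eq_getElem?, length_altAt,
        altAt_last seq alt0 s k h2 hs hL]
      by_cases hkL : k + 1 ≤ alt0.length
      · rw [if_pos hkL, if_pos (by omega), PySem.List.pyGet?_of_nonneg _ (by omega)]
        congr 1; omega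
      · rw [if_neg hkL, if_neg (by omega), PySem.List.pyGet?_of_nonneg _ (by omega)]
        congr 1; omega
    obtain ⟨a, ha⟩ : ∃ a, PySem.List.pyGet? (altAt seq alt0 s k) (-1) = some a := by
      rw [key]
      by_cases hkL : k + 1 ≤ alt0.length
      · rw [if_pos (by omega), PySem.List.pyGet?_of_nonneg _ (by omega)]
        exact ⟨_, List.getElem?_eq_getElem (by omega)⟩
      · rw [if_neg (by omega), PySem.List.pyGet?_of_nonneg _ (by omega)]
        exact ⟨_, List.getElem?_eq_getElem (by omega)⟩
    have hc : (if 0 ≤ (alt0.length : Int) - 1 - k then PySem.List.pyGet? alt0 ((alt0.length : Int) - 1 - k)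
         else PySem.List.pyGet? seq ((s : Int) + ((alt0.length : Int) - 1 - k))) = some a := key ▸ ha
    have hd : PySem.List.pyGet? seq ((s : Int) - k) = some (seq[s - k]'(by omega)) := by
      rw [PySem.List.pyGet?_of_nonneg _ (by omega)]
      have hsk : ((s : Int) - k).toNat = s - k := by omega
      rw [hsk]
      exact List.getElem?_eq_getElem (by omega)
    by_cases hks : k = s
    · -- start - k = 0 : both loops stop here
      refine ⟨k, le_refl _, h2, ?_, ?_⟩
      · exact scanB_step_out seq alt0 _ _ fuel _ (by omega)
      · rw [loopA_step_neg seq fuel _ _ _ _ _ _ ha hd (by rintro ⟨-, hlt0⟩; omega)]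
    · have hlt : k < s := by omega
      by_cases hab : a = seq[s - k]'(by omega)
      · -- one more shift; step both loops and use the induction hypothesis
        have hd' : PySem.List.pyGet? seq ((s : Int) - k - 1) = some (seq[s - (k+1)]'(by omega)) := by
          rw [PySem.List.pyGet?_of_nonneg _ (by omega)]
          have : ((s : Int) - k - 1).toNat = s - (k + 1) := by omega
          rw [this]
          exact List.getElem?_eq_getElem (by omega)
        obtain ⟨K, hK1, hK2, hscan, hloop⟩ := ih (k + 1) (by omega) (by omega) (by omega)
        refine ⟨K, by omega, hK2, ?_, ?_⟩
        · rw [scanB_step_go seq alt0 _ _ fuel _ _ _ (by omega) hc hd hab]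
          have e0 : (k : Int) + 1 = ((k + 1 : Nat) : Int) := by push_cast; ring
          rw [e0, hscan]
        · rw [loopA_step_pos seq fuel _ _ _ _ _ _ _ ha hd ⟨hab, by omega⟩ hd']
          have e1 : (s : Int) - ↑k - 1 = ((s - (k + 1) : Nat) : Int) := by omega
          have e2 : (s : Int) - ↑k + ↑R - 1 = ((s - (k + 1) : Nat) : Int) + (R : Int) := by omega
          rw [e1, e2, PySem.List.slice_natCast_add, PySem.List.slice_to_neg_one,
            ← altAt_succ seq alt0 s k (by omega) hL (by omega)]
          have e3 : ((s - (k + 1) : Nat) : Int) = (s : Int) - ((k + 1 : Nat) : Int) := by omega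
          rw [e3, hloop]
      · -- chars differ: both loops stop with K = k
        refine ⟨k, le_refl _, h2, ?_, ?_⟩
        · exact scanB_step_stop seq alt0 _ _ fuel _ _ _ (by omega) hc hd hab
        · rw [loopA_step_neg seq fuel _ _ _ _ _ _ ha hd (by rintro ⟨heq2, -⟩; exact hab heq2)]

lemma toList_ne_nil (alt : String) (h : alt ≠ "") : alt.toList ≠ [] := by
  intro h2; exact h (String.toList_eq_nil_iff.mp h2)

lemma A_branch (chrom : String) (pos : Int) (ref alt : String) (fasta : List (String × String))
    (seqS : String) (hsw : PySem.Str.slice alt none (some (PySem.Str.len ref)) = ref)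
    (hget : (PySem.Dict.mk fasta).get? chrom = some seqS) :
    left_align_insertion chrom pos ref alt fasta =
      (String.ofList (laLoopA seqS.toList ((pos - 1).toNat + 1) (pos - 1) (pos - 1 + PySem.Str.len ref) ref.toList alt.toList).2.1,
       String.ofList (laLoopA seqS.toList ((pos - 1).toNat + 1) (pos - 1) (pos - 1 + PySem.Str.len ref) ref.toList alt.toList).2.2,
       (laLoopA seqS.toList ((pos - 1).toNat + 1) (pos - 1) (pos - 1 + PySem.Str.len ref) ref.toList alt.toList).1 + 1) := by
  unfold left_align_insertion
  rw [if_neg (not_not_intro hsw), hget]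

lemma B_branch (chrom : String) (pos : Int) (ref alt : String) (fasta : List (String × String))
    (seqS : String) (hsw : PySem.Str.slice alt none (some (PySem.Str.len ref)) = ref)
    (hget : (PySem.Dict.mk fasta).get? chrom = some seqS) :
    left_align_insertion_alt chrom pos ref alt fasta =
      (if laScanB seqS.toList alt.toList (pos - 1) (PySem.Str.len alt) ((pos - 1).toNat + 1) 0 = 0 then (ref, alt, pos)
       else
        (String.ofList (PySem.List.slice seqS.toList (some (pos - 1 - laScanB seqS.toList alt.toList (pos - 1) (PySem.Str.len alt) ((pos - 1).toNat + 1) 0)) (some (pos - 1 - laScanB seqS.toList alt.toList (pos - 1) (PySem.Str.len alt) ((pos - 1).toNat + 1) 0 + PySem.Str.len ref))),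
         String.ofList (PySem.List.slice (PySem.List.slice seqS.toList (some (pos - 1 - laScanB seqS.toList alt.toList (pos - 1) (PySem.Str.len alt) ((pos - 1).toNat + 1) 0)) (some (pos - 1)) ++ alt.toList) none (some (PySem.Str.len alt))),
         pos - 1 - laScanB seqS.toList alt.toList (pos - 1) (PySem.Str.len alt) ((pos - 1).toNat + 1) 0 + 1)) := by
  unfold left_align_insertion_alt
  rw [if_neg (not_not_intro hsw), hget]

-- ===== VERDICT (by name: the statement is the Claim_ definition above) =====
theorem left_align_insertion_spec : Claim_equal_left_align_insertion := by
  intro chrom pos ref alt fasta _hDom hPre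
  show left_align_insertion chrom pos ref alt fasta = left_align_insertion_alt chrom pos ref alt fasta
  by_cases hsw : PySem.Str.slice alt none (some (PySem.Str.len ref)) = ref
  case neg =>
    unfold left_align_insertion left_align_insertion_alt
    rw [if_pos hsw, if_pos hsw]
  case pos =>
    obtain ⟨hsome, halt, hlo, hhi⟩ := hPre hsw
    obtain ⟨seqS, hget⟩ := Option.isSome_iff_exists.mp hsome
    rw [hget] at hlo hhi
    simp only [Option.getD_some] at hlo hhi
    rw [A_branch chrom pos ref alt fasta seqS hsw hget, B_branch chrom pos ref alt fasta seqS hsw hget]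
    have hL0 : alt.toList ≠ [] := toList_ne_nil alt halt
    have h0 : 0 < alt.toList.length := List.length_pos_of_ne_nil hL0
    rw [PySem.Str.len_eq] at hlo hhi
    rw [PySem.Str.len_eq ref, PySem.Str.len_eq alt]
    set seq := seqS.toList with hseq
    set alt0 := alt.toList with halt0
    set L := alt0.length with hLdef
    set R := ref.toList.length with hRdef
    have ha : PySem.List.pyGet? alt0 (-1) = some (alt0[L - 1]'(by omega)) := by
      rw [PySem.List.pyGet?_neg_one, List.getLast?_eq_getElem?]
      exact List.getElem?_eq_getElem (by omega)
    by_cases hneg : pos - 1 ≤ 0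
    · -- start ≤ 0 : the loop body never runs in either program
      have hfuel : (pos - 1).toNat = 0 := by omega
      rw [hfuel]
      obtain ⟨b, hb⟩ : ∃ b, PySem.List.pyGet? seq (pos - 1) = some b := by
        cases hq : PySem.List.pyGet? seq (pos - 1) with
        | none =>
          rw [PySem.List.pyGet?_eq_none_iff] at hq
          exact absurd ⟨by omega, by omega⟩ hq
        | some b => exact ⟨b, rfl⟩
      rw [loopA_step_neg seq 0 _ _ _ _ _ _ ha hb (by rintro ⟨-, hx⟩; omega)]
      rw [scanB_step_out seq alt0 _ _ 0 0 (by omega)]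
      rw [if_pos rfl]
      simp only [String.ofList_toList, Prod.mk.injEq]
      exact ⟨trivial, by simp [halt0], by ring⟩
    · -- start ≥ 1
      have hs1 : 1 ≤ (pos - 1).toNat := by omega
      set s := (pos - 1).toNat with hsdef
      have hcast : pos - 1 = (s : Int) := by omega
      have hs : s < seq.length := by omega
      rw [hcast]
      have hd0 : PySem.List.pyGet? seq (s : Int) = some (seq[s]'hs) := by
        rw [PySem.List.pyGet?_of_nonneg _ (by omega)]
        simp
      have hc0 : (if 0 ≤ (L : Int) - 1 - 0 then PySem.List.pyGet? alt0 ((L : Int) - 1 - 0)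
           else PySem.List.pyGet? seq ((s : Int) + ((L : Int) - 1 - 0))) = some (alt0[L - 1]'(by omega)) := by
        rw [if_pos (by omega), PySem.List.pyGet?_of_nonneg _ (by omega)]
        have : ((L : Int) - 1 - 0).toNat = L - 1 := by omega
        rw [this]
        exact List.getElem?_eq_getElem (by omega)
      by_cases hab : alt0[L - 1]'(by omega) = seq[s]'hs
      · -- at least one shift happens
        have hd' : PySem.List.pyGet? seq ((s : Int) - 1) = some (seq[s - 1]'(by omega)) := by
          rw [PySem.List.pyGet?_of_nonneg _ (by omega)]
          have : ((s : Int) - 1).toNat = s - 1 := by omega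
          rw [this]
          exact List.getElem?_eq_getElem (by omega)
        obtain ⟨K, hK1, hK2, hscan, hloop⟩ := loop_scan seq alt0 R s hs hL0 s 1 (le_refl 1) (by omega) (by omega)
        simp only [Nat.cast_one] at hscan hloop
        rw [← hLdef] at hscan
        rw [loopA_step_pos seq s _ _ _ _ _ _ _ ha hd0 ⟨hab, by omega⟩ hd']
        have eref : PySem.List.slice seq (some ((s : Int) - 1)) (some ((s : Int) + R - 1)) = (seq.drop (s - 1)).take R := by
          have e1 : (s : Int) - 1 = ((s - 1 : Nat) : Int) := by omega
          have e2 : (s : Int) + R - 1 = ((s - 1 : Nat) : Int) + (R : Int) := by omega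
          rw [e1, e2, PySem.List.slice_natCast_add]
        have ealt : (seq[s - 1]'(by omega)) :: PySem.List.slice alt0 none (some (-1)) = altAt seq alt0 s 1 := by
          rw [PySem.List.slice_to_neg_one, altAt_succ seq alt0 s 0 (by omega) hL0 (by omega), altAt_zero]
        rw [eref, ealt]
        have e4 : (s : Int) + (R : Int) - 1 = (s : Int) - 1 + (R : Int) := by ring
        rw [e4, hloop]
        rw [scanB_step_go seq alt0 _ _ s 0 _ _ (by omega) hc0 (by rw [sub_zero]; exact hd0) hab]
        norm_num
        rw [hscan]
        rw [if_neg (by omega)]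
        have e5 : (s : Int) - (K : Int) = ((s - K : Nat) : Int) := by omega
        simp only [Prod.mk.injEq]
        refine ⟨?_, ?_, trivial⟩
        · congr 1
          rw [e5, PySem.List.slice_natCast_add]
        · congr 1
          simp only [e5, PySem.List.slice_natCast]
          have e6 : s - (s - K) = K := by omega
          rw [e6]
          rfl
      · -- no shift: both return the inputs unchanged
        rw [loopA_step_neg seq s _ _ _ _ _ _ ha hd0 (by rintro ⟨hx, -⟩; exact hab hx)]
        rw [scanB_step_stop seq alt0 _ _ s 0 _ _ (by omega) (by rw [sub_zero] at hc0 ⊢; exact hc0) (by rw [sub_zero]; exact hd0) hab]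
        rw [if_pos rfl]
        simp only [String.ofList_toList, Prod.mk.injEq]
        exact ⟨trivial, by simp [halt0], by omega⟩
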